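-- pv_equiv track=rewrite | github.com/rawbby/2025-Distributed-SCC-Benchmarks | validate.py | build_comp_map_from_parts
-- ===== SOURCE A (Python) =====
-- from collections import defaultdict
--
-- def build_comp_map_from_parts(parts):
--     """
--     Given {v: rep}, invert to {rep: sorted list of vertices},
--     then stringify each list "v1 v2 v3 ...".
--     """
--     comp = defaultdict(list)
--     for v, r in parts.items():
--         comp[r].append(v)
--     out = {}
--     for r, vs in comp.items():
--         vs_sorted = sorted(vs)
--         out[r] = " ".join(map(str, vs_sorted))
--     return out
-- ===== SOURCE B (Python) =====
-- def build_comp_map_from_parts(parts):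
--     # No inverted index at all: sort the items once by vertex, then for each
--     # first-seen representative emit its line by a direct filtering scan of
--     # that sorted sequence (rep order = first appearance, as in the input).
--     items = sorted(parts.items(), key=lambda kv: kv[0])
--     out = {}
--     for _, r in parts.items():
--         if r not in out:
--             out[r] = " ".join(str(v) for v, rr in items if rr == r)
--     return out
-- ===== Notes on version B (the rewrite author's own statement) =====
-- stated objective: alternative
-- what changed: Removes A's inverted rep->list index entirely: B sorts the items once by vertex and builds each representative's line by a direct filtering scan of that sorted sequence, keyed by first appearance of the rep.
import Mathlib
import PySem

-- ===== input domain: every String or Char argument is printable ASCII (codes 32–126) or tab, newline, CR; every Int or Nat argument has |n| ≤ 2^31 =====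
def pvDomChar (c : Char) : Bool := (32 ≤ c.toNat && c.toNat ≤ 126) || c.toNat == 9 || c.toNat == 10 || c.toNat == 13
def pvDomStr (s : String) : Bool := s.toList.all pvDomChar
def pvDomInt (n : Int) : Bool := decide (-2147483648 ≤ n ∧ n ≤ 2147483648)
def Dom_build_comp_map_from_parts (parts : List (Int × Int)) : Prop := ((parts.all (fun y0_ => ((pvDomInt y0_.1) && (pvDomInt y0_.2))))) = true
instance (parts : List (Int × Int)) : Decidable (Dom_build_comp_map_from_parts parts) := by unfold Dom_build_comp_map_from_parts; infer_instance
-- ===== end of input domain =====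

-- B drops A's inverted rep->list index: one global sort by vertex, then each
-- rep's line comes from a filtering scan of the sorted items (objective: alternative).

-- ===== PORT A =====
-- A: group vertices by rep in insertion order, then sort each group and join.
def build_comp_map_from_parts (parts : List (Int × Int)) : List (Int × String) :=
  let comp := (PySem.Dict.ofList parts).items.foldl
    (fun c (p : Int × Int) => c.modify p.2 [] (· ++ [p.1])) PySem.Dict.empty
  let out := comp.items.foldl
    (fun (o : PySem.Dict Int String) (p : Int × List Int) =>
      o.insert p.1 (PySem.Str.join " "
        ((PySem.List.sorted p.2 (fun x => x) false).map PySem.Int.toStr)))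
    PySem.Dict.empty
  out.items

-- ===== PORT B =====
-- B: sort the items once by vertex; for each first-seen rep, emit its line by
-- filtering the sorted items (no grouping structure at all).
def build_comp_map_from_parts_alt (parts : List (Int × Int)) : List (Int × String) :=
  let d := PySem.Dict.ofList parts
  let items := PySem.List.sorted d.items (fun kv => kv.1) false
  let out := d.items.foldl
    (fun (o : PySem.Dict Int String) (p : Int × Int) =>
      if o.contains p.2 then o
      else o.insert p.2 (PySem.Str.join " "
        ((items.filter (fun q => q.2 == p.2)).map (fun q => PySem.Int.toStr q.1))))
    PySem.Dict.empty
  out.items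

-- ===== PRECONDITION & SPEC =====
def Spec_build_comp_map_from_parts (parts : List (Int × Int)) (out : List (Int × String)) : Prop := out = build_comp_map_from_parts_alt parts
instance (parts : List (Int × Int)) (out : List (Int × String)) : Decidable (Spec_build_comp_map_from_parts parts out) := by unfold Spec_build_comp_map_from_parts; infer_instance

-- ===== CLAIM =====
def Claim_equal_build_comp_map_from_parts : Prop := ∀ (parts : List (Int × Int)), Dom_build_comp_map_from_parts parts → Spec_build_comp_map_from_parts parts (build_comp_map_from_parts parts)

-- ===== LEMMAS AND PROOFS =====

-- the grouping loop of A, reduced to a filter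
theorem getD_group_loop (l : List (Int × Int)) (r : Int) :
    ((l.foldl (fun c (p : Int × Int) => c.modify p.2 [] (· ++ [p.1]))
        (PySem.Dict.empty : PySem.Dict Int (List Int))).getD r [])
      = (l.filter (fun p => p.2 == r)).map (·.1) := by
  have h := PySem.Dict.getD_foldl_modify_append (l := l.map Prod.swap)
    (d := (PySem.Dict.empty : PySem.Dict Int (List Int))) (c := r)
  rw [List.foldl_map] at h
  simpa [Prod.swap, List.filter_map, Function.comp] using h

-- B's "insert-if-absent with a key-determined value" loop: its items are the
-- ordered dedup of the keys, each paired with its value.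
theorem items_setdefault_loop (l : List Int) (f : Int → String)
    (s : List Int) (o : PySem.Dict Int String)
    (ho : o.items = s.map (fun r => (r, f r))) :
    ((l.foldl (fun (o : PySem.Dict Int String) (r : Int) =>
        if o.contains r then o else o.insert r (f r)) o).items)
      = (PySem.Set.update s l).map (fun r => (r, f r)) := by
  induction l generalizing s o with
  | nil => simpa [PySem.Set.update] using ho
  | cons x xs ih =>
    have hkeys : o.keys = s := by
      simp [PySem.Dict.keys, ho, List.map_map, Function.comp_def]
    have hcont : o.contains x = PySem.Set.contains s x := by
      rw [PySem.Dict.contains_eq_decide_mem_keys, hkeys]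
      simp [PySem.Set.contains_eq_listContains]
    simp only [List.foldl_cons]
    by_cases hc : PySem.Set.contains s x = true
    · rw [hcont]
      simp only [hc, if_true]
      have : PySem.Set.update s (x :: xs) = PySem.Set.update (PySem.Set.add s x) xs := by
        simp [PySem.Set.update]
      rw [this]
      have hx : x ∈ s := by simpa using hc
      have : PySem.Set.add s x = s := by simp [PySem.Set.add, hx]
      rw [this]
      exact ih s o ho
    · rw [hcont]
      simp only [hc]
      have hnc : o.contains x = false := by rw [hcont]; simpa using hc
      have hitems : (o.insert x (f x)).items = (s ++ [x]).map (fun r => (r, f r)) := by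
        rw [PySem.Dict.items_insert_of_not_contains (h := hnc), ho]; simp
      have hx : x ∉ s := by simpa using hc
      have hupd : PySem.Set.update s (x :: xs) = PySem.Set.update (s ++ [x]) xs := by
        simp [PySem.Set.update, PySem.Set.add, hx]
      rw [hupd]
      exact ih (s ++ [x]) _ hitems

theorem build_comp_map_from_parts_spec : Claim_equal_build_comp_map_from_parts := by
  intro parts _
  unfold Spec_build_comp_map_from_parts
  unfold build_comp_map_from_parts build_comp_map_from_parts_alt
  set items := (PySem.Dict.ofList parts).items with hitems
  have hnd : (items.map (·.1)).Nodup := by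
    simpa [PySem.Dict.keys] using PySem.Dict.nodup_keys_ofList (ps := parts)
  set comp := items.foldl (fun c (p : Int × Int) => c.modify p.2 [] (· ++ [p.1]))
      (PySem.Dict.empty : PySem.Dict Int (List Int)) with hcomp
  set ss := PySem.List.sorted items (fun kv => kv.1) false with hss
  -- A-side: comp has nodup keys = ofList of reps, and its items are key-determined
  have hcompnd : comp.keys.Nodup := by
    rw [hcomp]
    exact PySem.Dict.nodup_keys_foldl_modify_key items (fun p => p.2) []
      (fun d p => (· ++ [p.1])) _ PySem.Dict.nodup_keys_empty
  have hcompkeys : comp.keys = PySem.Set.ofList (items.map (·.2)) := by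
    rw [hcomp]
    rw [PySem.Dict.keys_foldl_modify_key]
    simp [PySem.Dict.keys_empty, PySem.Set.update_nil_left]
  have hcompitems : comp.items = comp.keys.map (fun k => (k, comp.getD k [])) :=
    PySem.Dict.items_eq_map_keys comp hcompnd []
  -- A's output = map over comp.items (all keys fresh into the empty out-dict)
  have hA : (comp.items.foldl
      (fun (o : PySem.Dict Int String) (p : Int × List Int) =>
        o.insert p.1 (PySem.Str.join " "
          ((PySem.List.sorted p.2 (fun x => x) false).map PySem.Int.toStr)))
      PySem.Dict.empty).items
      = comp.items.map (fun p => (p.1, PySem.Str.join " "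
          ((PySem.List.sorted p.2 (fun x => x) false).map PySem.Int.toStr))) := by
    exact PySem.Dict.items_foldl_insert_fresh (l := comp.items) (k := fun p => p.1)
      (v := fun p => PySem.Str.join " "
          ((PySem.List.sorted p.2 (fun x => x) false).map PySem.Int.toStr))
      (d := PySem.Dict.empty)
      (by intro a _; simp) (by simpa [PySem.Dict.keys] using hcompnd)
  -- B's output = map over ordered-dedup of the reps (insert-if-absent loop)
  have hB : ((items.foldl
      (fun (o : PySem.Dict Int String) (p : Int × Int) =>
        if o.contains p.2 then o
        else o.insert p.2 (PySem.Str.join " "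
          ((ss.filter (fun q => q.2 == p.2)).map (fun q => PySem.Int.toStr q.1))))
      PySem.Dict.empty).items)
      = (PySem.Set.ofList (items.map (·.2))).map (fun r => (r, PySem.Str.join " "
          ((ss.filter (fun q => q.2 == r)).map (fun q => PySem.Int.toStr q.1)))) := by
    have h := items_setdefault_loop (l := items.map (·.2))
      (f := fun r => PySem.Str.join " "
          ((ss.filter (fun q => q.2 == r)).map (fun q => PySem.Int.toStr q.1)))
      (s := []) (o := PySem.Dict.empty) (by simp [PySem.Dict.empty])
    rw [List.foldl_map] at h
    simpa [PySem.Set.ofList] using h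
  -- pointwise: per-group sort = filter of the global sort
  have hpoint : ∀ r : Int,
      PySem.List.sorted (comp.getD r []) (fun x => x) false
        = (ss.filter (fun q => q.2 == r)).map (·.1) := by
    intro r
    have hcg : comp.getD r [] = (items.filter (fun p => p.2 == r)).map (·.1) := by
      rw [hcomp]; exact getD_group_loop items r
    rw [hcg]
    apply PySem.List.sorted_eq_of_perm_of_pairwise_lt
    · exact (((PySem.List.sorted_perm items (fun kv => kv.1) false).filter _).map _).symm.symm
    · have hle : (ss.map (·.1)).Pairwise (· ≤ ·) :=
        PySem.List.sorted_map_key_pairwise items (fun kv => kv.1)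
      have hndss : (ss.map (·.1)).Nodup :=
        (((PySem.List.sorted_perm items (fun kv => kv.1) false).map (·.1)).nodup_iff).mpr hnd
      have hlt : (ss.map (·.1)).Pairwise (· < ·) := by
        refine (hle.and hndss).imp ?_
        rintro a b ⟨h1, h2⟩
        exact lt_of_le_of_ne h1 h2
      have hsub : ((ss.filter (fun q => q.2 == r)).map (·.1)).Sublist (ss.map (·.1)) :=
        (List.filter_sublist (l := ss)).map (·.1)
      exact hlt.sublist hsub
  rw [hA, hB, hcompitems, hcompkeys, List.map_map]
  exact List.map_congr_left (fun r _ => by simp [Function.comp_def, hpoint r])
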